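-- pv_equiv track=rewrite | github.com/mario99logic/SkyView | src/prog2.py | sChangeGroupOfSpacesToSingleTab
-- ===== SOURCE A (Python) =====
-- def sChangeGroupOfSpacesToSingleTab(s0):
-- 	sSS=""
-- 	s=""
-- 	for s1 in s0:
-- 		if s1!=" ":
-- 			if len(sSS)>0:
-- 				s+="\t"
-- 				sSS=""
-- 			s+=s1
-- 		else:
-- 			sSS+=" "
-- 	if len(sSS)>0:
-- 		s+="\t"
-- 	return s
-- ===== SOURCE B (Python) =====
-- from itertools import groupby
--
-- def sChangeGroupOfSpacesToSingleTab(s0):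
--     return "".join("\t" if ch == " " else "".join(g) for ch, g in groupby(s0))
-- ===== Notes on version B (the rewrite author's own statement) =====
-- stated objective: idiomatic
-- what changed: Replaces A's per-character loop with a pending-spaces accumulator by an itertools.groupby traversal over maximal runs of identical characters, mapping each space run to a single tab.
import Mathlib
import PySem

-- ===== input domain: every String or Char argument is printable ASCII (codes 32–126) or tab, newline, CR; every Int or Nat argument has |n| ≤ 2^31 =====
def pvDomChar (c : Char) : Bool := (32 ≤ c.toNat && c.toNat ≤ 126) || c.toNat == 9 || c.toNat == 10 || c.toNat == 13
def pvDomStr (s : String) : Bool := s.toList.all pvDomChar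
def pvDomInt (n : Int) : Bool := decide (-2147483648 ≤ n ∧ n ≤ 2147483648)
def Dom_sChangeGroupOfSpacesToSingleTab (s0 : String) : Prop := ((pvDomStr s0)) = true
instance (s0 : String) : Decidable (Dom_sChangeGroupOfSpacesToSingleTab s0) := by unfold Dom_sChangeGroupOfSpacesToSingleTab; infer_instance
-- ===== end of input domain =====

-- B replaces A's per-character loop with a space accumulator by a groupby-style
-- traversal of maximal runs of equal characters (objective: idiomatic).

-- ===== PORT A =====
-- state: (sSS pending spaces, s output so far), both as List Char (String.mk at the end)
def sChangeGroupOfSpacesToSingleTab (s0 : String) : String :=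
  let st := s0.toList.foldl
    (fun (acc : List Char × List Char) s1 =>
      if s1 ≠ ' ' then
        if acc.1.length > 0 then ([], acc.2 ++ ['\t'] ++ [s1])
        else (acc.1, acc.2 ++ [s1])
      else (acc.1 ++ [' '], acc.2))
    ([], [])
  String.mk (if st.1.length > 0 then st.2 ++ ['\t'] else st.2)

-- ===== PORT B =====
-- groupby: peel off one maximal run of equal characters at a time
def pvAltGo : List Char → List Char
  | [] => []
  | c :: rest =>
    (if c == ' ' then ['\t'] else c :: rest.takeWhile (· == c))
      ++ pvAltGo (rest.dropWhile (· == c))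
termination_by cs => cs.length
decreasing_by
  simpa using Nat.lt_succ_of_le (List.length_dropWhile_le (· == c) rest)

def sChangeGroupOfSpacesToSingleTab_alt (s0 : String) : String :=
  String.mk (pvAltGo s0.toList)

-- ===== PRECONDITION & SPEC =====
def Spec_sChangeGroupOfSpacesToSingleTab (s0 : String) (out : String) : Prop := out = sChangeGroupOfSpacesToSingleTab_alt s0
instance (s0 : String) (out : String) : Decidable (Spec_sChangeGroupOfSpacesToSingleTab s0 out) := by unfold Spec_sChangeGroupOfSpacesToSingleTab; infer_instance

-- ===== CLAIM (what is proved, stated in full; the proofs are below) =====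
def Claim_equal_sChangeGroupOfSpacesToSingleTab : Prop := ∀ (s0 : String), Dom_sChangeGroupOfSpacesToSingleTab s0 → Spec_sChangeGroupOfSpacesToSingleTab s0 (sChangeGroupOfSpacesToSingleTab s0)

-- ===== LEMMAS AND PROOFS =====

-- A's loop body, named (definitionally equal to the lambda inside the port of A)
def pvStep (acc : List Char × List Char) (s1 : Char) : List Char × List Char :=
  if s1 ≠ ' ' then
    if acc.1.length > 0 then ([], acc.2 ++ ['\t'] ++ [s1])
    else (acc.1, acc.2 ++ [s1])
  else (acc.1 ++ [' '], acc.2)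

-- the rest of A's output given the remaining input and whether spaces are pending
def pvSuffix : List Char → Bool → List Char
  | [], b => if b then ['\t'] else []
  | c :: rest, b =>
    if c ≠ ' ' then (if b then '\t' :: c :: pvSuffix rest false else c :: pvSuffix rest false)
    else pvSuffix rest true

-- A's foldl produces s ++ pvSuffix cs (sSS nonempty)
theorem pvFold_eq_suffix (cs : List Char) : ∀ (sSS s : List Char),
    (let st := cs.foldl pvStep (sSS, s)
     (if st.1.length > 0 then st.2 ++ ['\t'] else st.2))
    = s ++ pvSuffix cs (sSS.length > 0) := by
  induction cs with
  | nil =>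
    intro sSS s
    simp only [List.foldl_nil, pvSuffix]
    split_ifs <;> simp_all
  | cons c rest ih =>
    intro sSS s
    simp only [List.foldl_cons]
    by_cases hc : c = ' '
    · have h1 : pvStep (sSS, s) c = (sSS ++ [' '], s) := by simp [pvStep, hc]
      rw [h1, ih]
      simp [pvSuffix, hc]
    · by_cases hl : sSS.length > 0
      · have h1 : pvStep (sSS, s) c = ([], s ++ ['\t'] ++ [c]) := by simp [pvStep, hc, hl]
        rw [h1, ih]
        simp [pvSuffix, hc, hl]
      · have h1 : pvStep (sSS, s) c = (sSS, s ++ [c]) := by simp [pvStep, hc, hl]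
        rw [h1, ih]
        have hl' : sSS.length = 0 := by omega
        simp [pvSuffix, hc, hl']

theorem pvSuffix_true (cs : List Char) :
    pvSuffix cs true = '\t' :: pvSuffix (cs.dropWhile (· == ' ')) false := by
  induction cs with
  | nil => simp [pvSuffix]
  | cons c rest ih =>
    by_cases hc : c = ' '
    · subst hc; simpa [pvSuffix] using ih
    · have hb : (c == ' ') = false := by simp [hc]
      simp [pvSuffix, hc, hb, List.dropWhile_cons]

theorem pvSuffix_run (c : Char) (hc : c ≠ ' ') (rest : List Char) :
    pvSuffix rest false
      = rest.takeWhile (· == c) ++ pvSuffix (rest.dropWhile (· == c)) false := by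
  induction rest with
  | nil => simp
  | cons d rest2 ih =>
    by_cases hd : d = c
    · subst hd
      simp [pvSuffix, List.takeWhile_cons, List.dropWhile_cons, hc, ih]
    · have hb : (d == c) = false := by simp [hd]
      simp [List.takeWhile_cons, List.dropWhile_cons, hb]

theorem pvSuffix_eq_altGo (n : ℕ) : ∀ (cs : List Char), cs.length ≤ n →
    pvSuffix cs false = pvAltGo cs := by
  induction n with
  | zero =>
    intro cs h
    have : cs = [] := List.eq_nil_of_length_eq_zero (Nat.le_zero.mp h)
    subst this; simp [pvSuffix, pvAltGo]
  | succ n ih =>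
    intro cs h
    match cs with
    | [] => simp [pvSuffix, pvAltGo]
    | c :: rest =>
      have hlen : (rest.dropWhile (· == c)).length ≤ n := by
        have := List.length_dropWhile_le (· == c) rest
        simp at h; omega
      by_cases hc : c = ' '
      · subst hc
        rw [pvAltGo]
        simp only [pvSuffix, ne_eq, not_true_eq_false, if_false, beq_self_eq_true, if_true]
        rw [pvSuffix_true, ih _ hlen]
        simp
      · have hb : (c == ' ') = false := by simp [hc]
        rw [pvAltGo]
        simp only [hb, pvSuffix, ne_eq, hc, not_false_eq_true, if_true, if_false]
        rw [pvSuffix_run c hc rest, ih _ hlen]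
        simp

-- ===== VERDICT (by name: the statement is the Claim_ definition above) =====
theorem sChangeGroupOfSpacesToSingleTab_spec : Claim_equal_sChangeGroupOfSpacesToSingleTab := by
  intro s0 _
  show sChangeGroupOfSpacesToSingleTab s0 = sChangeGroupOfSpacesToSingleTab_alt s0
  show String.mk (let st := s0.toList.foldl pvStep ([], [])
        (if st.1.length > 0 then st.2 ++ ['\t'] else st.2))
      = String.mk (pvAltGo s0.toList)
  rw [pvFold_eq_suffix s0.toList [] []]
  simp [pvSuffix_eq_altGo s0.toList.length s0.toList le_rfl]
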